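-- pv_equiv track=rewrite | github.com/Squirrlle/AI | mine.py | revieledNei
-- ===== SOURCE A (Python) =====
-- def revieledNei(i, x, currgrid):
--     gridsize = len(currgrid)
--     numRevieled = 0
--     for y in range(-1, 2):
--         for z in range (-1, 2):
--             if y == 0 and z == 0:
--                 continue
--             elif -1 < (i + y) < gridsize and -1 < (x + z) < gridsize:
--                 if currgrid[i + y][x + z] != ' ' and currgrid[i + y][x + z] != 'F':
--                     numRevieled += 1
--     return numRevieled
-- ===== SOURCE B (Python) =====
-- def revieledNei(i, x, currgrid):
--     n = len(currgrid)
--     rows = currgrid[max(0, i - 1):max(0, min(n, i + 2))]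
--     clo, chi = max(0, x - 1), max(0, min(n, x + 2))
--     total = 0
--     for row in rows:
--         for cell in row[clo:chi]:
--             if cell != ' ' and cell != 'F':
--                 total += 1
--     if 0 <= i < n and 0 <= x < n and x < len(currgrid[i]):
--         c = currgrid[i][x]
--         if c != ' ' and c != 'F':
--             total -= 1
--     return total
-- ===== Notes on version B (the rewrite author's own statement) =====
-- stated objective: alternative
-- what changed: B replaces A's per-offset 3x3 loop with a continue branch skipping the center by slicing the clamped neighborhood subgrid out of the grid, counting every revealed cell in it in one pass, and then subtracting the center cell's own contribution if it is revealed.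
import Mathlib
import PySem

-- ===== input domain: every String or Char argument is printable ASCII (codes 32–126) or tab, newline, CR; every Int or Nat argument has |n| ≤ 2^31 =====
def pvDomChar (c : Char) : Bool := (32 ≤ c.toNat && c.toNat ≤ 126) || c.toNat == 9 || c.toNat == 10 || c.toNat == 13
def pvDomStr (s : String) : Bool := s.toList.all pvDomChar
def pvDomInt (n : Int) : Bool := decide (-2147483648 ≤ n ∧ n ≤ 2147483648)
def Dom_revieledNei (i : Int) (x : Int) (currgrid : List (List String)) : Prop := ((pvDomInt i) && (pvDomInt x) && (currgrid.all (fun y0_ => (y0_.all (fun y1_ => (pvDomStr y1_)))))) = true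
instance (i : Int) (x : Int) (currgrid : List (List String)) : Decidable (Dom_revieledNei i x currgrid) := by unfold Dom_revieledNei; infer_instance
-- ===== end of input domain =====

-- B replaces A's per-offset double loop with its center-skip branch by counting the clamped
-- sliced 3x3 subgrid in one pass and subtracting the center cell if it is revealed
-- (objective: alternative decomposition, same cost).


-- ===== PORT A =====
def revieledNei (i : Int) (x : Int) (currgrid : List (List String)) : Int :=
  let gridsize : Int := currgrid.length
  (PySem.List.pyRange (-1) 2 1).foldl (fun numRevieled y =>
    (PySem.List.pyRange (-1) 2 1).foldl (fun numRevieled z =>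
      if y = 0 ∧ z = 0 then numRevieled
      else if (-1 < i + y ∧ i + y < gridsize) ∧ (-1 < x + z ∧ x + z < gridsize) then
        -- currgrid[i+y][x+z]: in range under Pre_ (Python raises IndexError otherwise)
        if PySem.List.pyGetD (PySem.List.pyGetD currgrid (i + y) []) (x + z) " " ≠ " " ∧
           PySem.List.pyGetD (PySem.List.pyGetD currgrid (i + y) []) (x + z) " " ≠ "F" then
          numRevieled + 1
        else numRevieled
      else numRevieled) numRevieled) 0

-- ===== PORT B =====
def revieledNei_alt (i : Int) (x : Int) (currgrid : List (List String)) : Int :=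
  let n : Int := currgrid.length
  let rows := PySem.List.slice currgrid (some (max 0 (i - 1))) (some (max 0 (min n (i + 2))))
  let clo : Int := max 0 (x - 1)
  let chi : Int := max 0 (min n (x + 2))
  let total := rows.foldl (fun total row =>
    (PySem.List.slice row (some clo) (some chi)).foldl (fun total cell =>
      if cell ≠ " " ∧ cell ≠ "F" then total + 1 else total) total) 0
  if (0 ≤ i ∧ i < n) ∧ (0 ≤ x ∧ x < n) ∧ x < ((PySem.List.pyGetD currgrid i []).length : Int) then
    if PySem.List.pyGetD (PySem.List.pyGetD currgrid i []) x " " ≠ " " ∧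
       PySem.List.pyGetD (PySem.List.pyGetD currgrid i []) x " " ≠ "F" then total - 1 else total
  else total

-- ===== PRECONDITION & SPEC =====
-- Pre_ excludes exactly the ragged grids on which A raises IndexError: some neighbour cell whose
-- row index and column index both pass A's bound checks (both < len(currgrid)) but whose row is
-- shorter than the column index.  A returns normally on every other input.
def Pre_revieledNei (i : Int) (x : Int) (currgrid : List (List String)) : Prop :=
  ∀ y ∈ ([-1, 0, 1] : List Int), ∀ z ∈ ([-1, 0, 1] : List Int),
    ¬(y = 0 ∧ z = 0) →
    0 ≤ i + y → i + y < (currgrid.length : Int) →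
    0 ≤ x + z → x + z < (currgrid.length : Int) →
    x + z < ((PySem.List.pyGetD currgrid (i + y) []).length : Int)
instance (i : Int) (x : Int) (currgrid : List (List String)) : Decidable (Pre_revieledNei i x currgrid) := by unfold Pre_revieledNei; infer_instance

def pvWitness_revieledNei : Int × Int × List (List String) :=
  (1, 1, [["1", " ", "F"], [" ", "2", "1"], ["F", "1", " "]])

def Spec_revieledNei (i : Int) (x : Int) (currgrid : List (List String)) (out : Int) : Prop := out = revieledNei_alt i x currgrid
instance (i : Int) (x : Int) (currgrid : List (List String)) (out : Int) : Decidable (Spec_revieledNei i x currgrid out) := by unfold Spec_revieledNei; infer_instance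

-- ===== CLAIM (what is proved, stated in full; the proofs are below) =====
def Claim_equal_revieledNei : Prop := ∀ (i : Int) (x : Int) (currgrid : List (List String)), Dom_revieledNei i x currgrid → Pre_revieledNei i x currgrid → Spec_revieledNei i x currgrid (revieledNei i x currgrid)

-- ===== LEMMAS AND PROOFS =====

-- 0/1 indicator of a revealed cell
def pvInd (s : String) : Int := if s ≠ " " ∧ s ≠ "F" then 1 else 0

-- the cell at (r, c), with defaults that make a missing cell count as unrevealed
def pvCell (g : List (List String)) (r c : Int) : String :=
  PySem.List.pyGetD (PySem.List.pyGetD g r []) c " "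

-- A's contribution of the cell at (r, c)
def pvJ (g : List (List String)) (r c : Int) : Int :=
  if (-1 < r ∧ r < (g.length : Int)) ∧ (-1 < c ∧ c < (g.length : Int)) then pvInd (pvCell g r c) else 0

theorem pvRange_m1_2 : PySem.List.pyRange (-1) 2 1 = [-1, 0, 1] := by
  rw [PySem.List.pyRange_one_cons (by norm_num), PySem.List.pyRange_one_cons (by norm_num),
      PySem.List.pyRange_one_cons (by norm_num), PySem.List.pyRange_one_eq_nil (by norm_num)]
  norm_num

-- A computes the sum of the eight neighbour contributions
theorem A_char (i x : Int) (g : List (List String)) :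
    revieledNei i x g =
      pvJ g (i - 1) (x - 1) + pvJ g (i - 1) x + pvJ g (i - 1) (x + 1) +
      pvJ g i (x - 1) + pvJ g i (x + 1) +
      pvJ g (i + 1) (x - 1) + pvJ g (i + 1) x + pvJ g (i + 1) (x + 1) := by
  have hbody : ∀ (acc y z : Int),
      (if y = 0 ∧ z = 0 then acc
       else if (-1 < i + y ∧ i + y < (g.length : Int)) ∧ (-1 < x + z ∧ x + z < (g.length : Int)) then
         if PySem.List.pyGetD (PySem.List.pyGetD g (i + y) []) (x + z) " " ≠ " " ∧
            PySem.List.pyGetD (PySem.List.pyGetD g (i + y) []) (x + z) " " ≠ "F" then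
           acc + 1
         else acc
       else acc)
      = acc + (if y = 0 ∧ z = 0 then 0 else pvJ g (i + y) (x + z)) := by
    intro acc y z
    unfold pvJ pvInd pvCell
    split_ifs <;> omega
  unfold revieledNei
  simp only [hbody, PySem.List.foldl_add, pvRange_m1_2]
  norm_num
  ring_nf

-- summing a list function over a nonnegative drop/take window = summing defaulted lookups
-- over the index range, when the default contributes nothing
theorem pvSumDropTake {α : Type} (f : α → Int) (d : α) (hd : f d = 0) :
    ∀ (l : List α) (a j : Nat), (((l.drop a).take j).map f).sum =
      ((List.range j).map (fun t => f (l.getD (a + t) d))).sum := by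
  intro l
  induction l with
  | nil => intro a j; simp [hd]
  | cons s rs ih =>
    intro a j
    cases a with
    | zero =>
      cases j with
      | zero => simp
      | succ j' =>
        simp only [List.drop_zero, List.take_succ_cons, List.map_cons, List.sum_cons,
          List.range_succ_eq_map, List.map_map]
        have h1 := ih 0 j'
        simp only [List.drop_zero] at h1
        rw [h1]
        rfl
    | succ a' =>
      simp only [List.drop_succ_cons]
      rw [ih a' j]
      apply congrArg
      apply List.map_congr_left
      intro t ht
      have h : a' + 1 + t = (a' + t) + 1 := by omega
      rw [h, List.getD_cons_succ]

-- counting over l[a:b] = counting over range(a, b) through defaulted indexing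
theorem pvSumSlice {α : Type} (l : List α) (d : α) (f : α → Int) (hd : f d = 0)
    (a b : Int) (ha : 0 ≤ a) (hb : 0 ≤ b) :
    ((PySem.List.slice l (some a) (some b)).map f).sum =
      ((PySem.List.pyRange a b 1).map (fun j => f (PySem.List.pyGetD l j d))).sum := by
  rw [PySem.List.slice_toNat l ha hb]
  by_cases hba : b ≤ a
  · have h0 : b.toNat - a.toNat = 0 := by omega
    rw [h0, PySem.List.pyRange_one_eq_nil hba]; simp
  · rw [not_le] at hba
    rw [pvSumDropTake f d hd l a.toNat (b.toNat - a.toNat), PySem.List.pyRange_one a b]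
    have hc : (b - a).toNat = b.toNat - a.toNat := by omega
    rw [hc, List.map_map]
    apply congrArg
    apply List.map_congr_left
    intro t ht
    have h : a + (t : Int) = ((a.toNat + t : Nat) : Int) := by omega
    simp only [Function.comp]
    rw [h, PySem.List.pyGetD_natCast]

-- sum of f over a three-wide clamped window = the three bounded contributions
theorem pvWinsum (n m : Int) (hn : 0 ≤ n) (f g : Int → Int)
    (hfg : ∀ r, 0 ≤ r → r < n → f r = g r) (hg : ∀ r, r < 0 ∨ n ≤ r → g r = 0) :
    ((PySem.List.pyRange (max 0 (m - 1)) (max 0 (min n (m + 2))) 1).map f).sum =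
      g (m - 1) + g m + g (m + 1) := by
  have hmap : ((PySem.List.pyRange (max 0 (m - 1)) (max 0 (min n (m + 2))) 1).map f).sum =
      ((PySem.List.pyRange (max 0 (m - 1)) (max 0 (min n (m + 2))) 1).map g).sum := by
    apply congrArg
    apply List.map_congr_left
    intro r hr
    rw [PySem.List.mem_pyRange_one] at hr
    exact hfg r (by omega) (by omega)
  rw [hmap]
  by_cases hc : m + 2 ≤ 0 ∨ n ≤ m - 1
  · rw [PySem.List.pyRange_one_eq_nil (by omega)]
    rw [hg (m - 1) (by omega), hg m (by omega), hg (m + 1) (by omega)]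
    simp
  · rw [not_or, not_le, not_le] at hc
    have hs1 : ((PySem.List.pyRange (m - 1) (max 0 (m - 1)) 1).map g).sum = 0 := by
      apply List.sum_eq_zero
      intro v hv
      rw [List.mem_map] at hv
      obtain ⟨r, hr, rfl⟩ := hv
      rw [PySem.List.mem_pyRange_one] at hr
      exact hg r (by omega)
    have hs2 : ((PySem.List.pyRange (max 0 (min n (m + 2))) (m + 2) 1).map g).sum = 0 := by
      apply List.sum_eq_zero
      intro v hv
      rw [List.mem_map] at hv
      obtain ⟨r, hr, rfl⟩ := hv
      rw [PySem.List.mem_pyRange_one] at hr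
      exact hg r (by omega)
    have hfull : ((PySem.List.pyRange (m - 1) (m + 2) 1).map g).sum =
        ((PySem.List.pyRange (max 0 (m - 1)) (max 0 (min n (m + 2))) 1).map g).sum := by
      rw [PySem.List.pyRange_one_append (m - 1) (max 0 (m - 1)) (m + 2) (by omega) (by omega)]
      rw [PySem.List.pyRange_one_append (max 0 (m - 1)) (max 0 (min n (m + 2))) (m + 2) (by omega) (by omega)]
      simp only [List.map_append, List.sum_append, hs1, hs2]
      ring
    rw [← hfull]
    rw [PySem.List.pyRange_one_cons (by omega), PySem.List.pyRange_one_cons (by omega),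
        PySem.List.pyRange_one_cons (by omega), PySem.List.pyRange_one_eq_nil (by omega)]
    have e1 : m - 1 + 1 = m := by ring
    rw [e1]
    simp only [List.map_cons, List.map_nil, List.sum_cons, List.sum_nil]
    ring

-- B computes the full nine-cell window sum minus the centre contribution
theorem B_char (i x : Int) (g : List (List String)) :
    revieledNei_alt i x g =
      (pvJ g (i - 1) (x - 1) + pvJ g (i - 1) x + pvJ g (i - 1) (x + 1) +
       (pvJ g i (x - 1) + pvJ g i x + pvJ g i (x + 1)) +
       (pvJ g (i + 1) (x - 1) + pvJ g (i + 1) x + pvJ g (i + 1) (x + 1))) - pvJ g i x := by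
  have hn : (0:Int) ≤ (g.length : Int) := by positivity
  have hb2 : ∀ (acc : Int) (cell : String),
      (if cell ≠ " " ∧ cell ≠ "F" then acc + 1 else acc) = acc + pvInd cell := by
    intro acc cell; unfold pvInd; split_ifs <;> omega
  unfold revieledNei_alt
  simp only [hb2, PySem.List.foldl_add]
  rw [pvSumSlice g [] _ (by simp [PySem.List.slice_toNat]) _ _ (le_max_left _ _) (le_max_left _ _)]
  rw [pvWinsum (g.length : Int) i hn _ (fun r => pvJ g r (x - 1) + pvJ g r x + pvJ g r (x + 1))
      (by
        intro r hr0 hrn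
        rw [pvSumSlice (PySem.List.pyGetD g r []) " " pvInd (by simp [pvInd]) _ _ (le_max_left _ _) (le_max_left _ _)]
        rw [pvWinsum (g.length : Int) x hn _ (fun c => pvJ g r c)
            (by
              intro c hc0 hcn
              dsimp only
              unfold pvJ pvCell
              rw [if_pos ⟨⟨by omega, hrn⟩, ⟨by omega, hcn⟩⟩])
            (by intro c hc; dsimp only; unfold pvJ; rw [if_neg (by omega)])])
      (by
        intro r hr
        show pvJ g r (x - 1) + pvJ g r x + pvJ g r (x + 1) = 0
        unfold pvJ
        rw [if_neg (by omega), if_neg (by omega), if_neg (by omega)]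
        ring)]
  split_ifs with h1 h2
  · have hJix : pvJ g i x = 1 := by
      unfold pvJ pvCell pvInd
      rw [if_pos ⟨⟨by omega, by omega⟩, ⟨by omega, by omega⟩⟩, if_pos h2]
    rw [hJix]
    ring
  · have hJix : pvJ g i x = 0 := by
      unfold pvJ pvCell pvInd
      rw [if_pos ⟨⟨by omega, by omega⟩, ⟨by omega, by omega⟩⟩, if_neg h2]
    rw [hJix]
    ring
  · have hJix : pvJ g i x = 0 := by
      by_cases hb : (0 ≤ i ∧ i < (g.length : Int)) ∧ (0 ≤ x ∧ x < (g.length : Int))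
      · by_cases hlen : x < ((PySem.List.pyGetD g i []).length : Int)
        · exact absurd ⟨hb.1, hb.2, hlen⟩ h1
        · unfold pvJ pvCell
          rw [if_pos ⟨⟨by omega, by omega⟩, ⟨by omega, by omega⟩⟩]
          rw [PySem.List.pyGetD_of_none _ _ _
              ((PySem.List.pyGet?_eq_none_iff _ _).mpr (by simp only [PySem.Raise.InRange]; omega))]
          unfold pvInd
          rw [if_neg (by simp)]
      · unfold pvJ
        rw [if_neg (by omega)]
    rw [hJix]
    ring

-- ===== VERDICT (by name: the statement is the Claim_ definition above) =====
theorem revieledNei_spec : Claim_equal_revieledNei := by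
  intro i x g _ _
  unfold Spec_revieledNei
  rw [A_char, B_char]
  ring
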